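-- pv_equiv track=rewrite | github.com/Pixelpunker/pico8system | tools/picotool.py | gfx_lines
-- ===== SOURCE A (Python) =====
-- system_palette = [
-- 		0x0000, #rgb2(0, 0, 0),         # 0 	black (also transparent by default for sprites)
-- 		0x2511, #rgb2(29, 43, 83),      # 1 	dark-blue
-- 		0x2527, #rgb2(126, 37, 83),     # 2 	dark-purple
-- 		0x8530, #rgb2(0, 135, 81),      # 3 	dark-green
-- 		0x534A, #rgb2(171, 82, 54),     # 4 	brown
-- 		0x5455, #rgb2(95, 87, 79),      # 5 	dark-grey
-- 		0xCC6C, #rgb2(194, 195, 199),   # 6 	light-grey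
-- 		0xFE7F, #rgb2(255, 241, 232),   # 7 	white
-- 		0x048F, #rgb2(255, 0, 77),      # 8 	red
-- 		0xA09F, #rgb2(255, 163, 0),     # 9	orange
-- 		0xE2AF, #rgb2(255, 236, 39),    # 10	yellow
-- 		0xE3B0, #rgb2(0, 228, 54),      # 11 green
-- 		0xAFC2, #rgb2(41, 173, 255),    # 12 blue
-- 		0x79D8, #rgb2(131, 118, 156),   # 13 lavender
-- 		0x7AEF, #rgb2(255, 119, 168),   # 14 pink
-- 		0xCAFF, #rgb2(255, 204, 170),   # 15 light-peach
-- 		0x1102, #rgb2(41, 24, 20),    # 128 	brownish-black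
-- 		0x1311, #rgb2(17, 29, 53),    # 129 	darker-blue
-- 		0x2324, #rgb2(66, 33, 54),    # 130 	darker-purple
-- 		0x5531, #rgb2(18, 83, 89),    # 131 	blue-green
-- 		0x2247, #rgb2(116, 47, 41),   # 132 	dark-brown
-- 		0x3354, #rgb2(73, 51, 59),    # 133 	darker-grey
-- 		0x876A, #rgb2(162, 136, 121), # 134 	medium-grey
-- 		0xE77F, #rgb2(243, 239, 125), # 135 	light-yellow
-- 		0x158B, #rgb2(190, 18, 80),   # 136 	dark-red
-- 		0x629F, #rgb2(255, 108, 36),  # 137 	dark-orange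
-- 		0xE2AA, #rgb2(168, 231, 46),  # 138 	lime-green
-- 		0xB4B0, #rgb2(0, 181, 67),    # 139 	medium-green
-- 		0x5BC0, #rgb2(6, 90, 181),    # 140	true-blue
-- 		0x46D7, #rgb2(117, 70, 101),  # 141 	mauve
-- 		0x65EF, #rgb2(255, 110, 89),  # 142 	dark-peach
-- 		0x98FF #rgb2(255, 157, 129), # 143 	peach
-- ]
--
-- def gfx_lines(lines, version):
-- 		"""Create an instance based on .p8 data lines.
--
-- 		The base implementation reads lines of ASCII-encoded hexadecimal bytes.
--
-- 		Args:
-- 						lines: .p8 lines for the section.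
-- 						version: The PICO-8 data version from the game file header.
--
-- 		Returns:
-- 						A Gfx instance.
-- 		"""
-- 		arrayofbytes = []
-- 		formattedlines = []
-- 		for gfxline in lines:
-- 				if len(gfxline) == 129:
-- 						datastrs = []
-- 						larray = gfxline.rstrip()
-- 						for i in range(0, 128, 1):
-- 							arrayofbytes.append(system_palette[int(larray[i : i + 1], 16)])
-- 		chunk_size = 12
-- 		chunked_list = [arrayofbytes[i:i+chunk_size] for i in range(0, len(arrayofbytes), chunk_size)]
-- 		for i in range(len(chunked_list)):
-- 			substring = ", ".join(("0x{0:04X}".format(element))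
-- 														for element in chunked_list[i])
-- 			if i < len(chunked_list) - 1:
-- 					substring = "\t" + substring + ",\n"
-- 			else:
-- 					substring = "\t" + substring
-- 			formattedlines.append(substring)
-- 		return "\nstatic color_t spritedata[16384] =\n{\n"+("".join(formattedlines))+"\n};"
-- ===== SOURCE B (Python) =====
-- system_palette = [
--     0x0000, 0x2511, 0x2527, 0x8530, 0x534A, 0x5455, 0xCC6C, 0xFE7F,
--     0x048F, 0xA09F, 0xE2AF, 0xE3B0, 0xAFC2, 0x79D8, 0x7AEF, 0xCAFF,
--     0x1102, 0x1311, 0x2324, 0x5531, 0x2247, 0x3354, 0x876A, 0xE77F,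
--     0x158B, 0x629F, 0xE2AA, 0xB4B0, 0x5BC0, 0x46D7, 0x65EF, 0x98FF,
-- ]
--
-- def gfx_lines(lines, version):
--     # Pre-format the 32 palette entries once; build one flat list of formatted
--     # color strings, then emit with a prefix computed from the flat index.
--     fmt = ["0x{0:04X}".format(v) for v in system_palette]
--     vals = [fmt[int(c, 16)]
--             for line in lines if len(line) == 129
--             for c in line.rstrip()[:128]]
--     parts = [("\t" if i == 0 else ",\n\t" if i % 12 == 0 else ", ") + v
--              for i, v in enumerate(vals)]
--     return "\nstatic color_t spritedata[16384] =\n{\n" + "".join(parts) + "\n};"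
-- ===== Notes on version B (the rewrite author's own statement) =====
-- stated objective: alternative
-- what changed: B pre-formats the 32 palette entries once, builds a single flat list of formatted color strings, and emits the output in one index-driven pass (prefix chosen from i==0 / i%12==0), replacing A's build-bytes-then-chunk-into-lists-of-12-then-join two-stage pipeline.
import Mathlib
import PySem

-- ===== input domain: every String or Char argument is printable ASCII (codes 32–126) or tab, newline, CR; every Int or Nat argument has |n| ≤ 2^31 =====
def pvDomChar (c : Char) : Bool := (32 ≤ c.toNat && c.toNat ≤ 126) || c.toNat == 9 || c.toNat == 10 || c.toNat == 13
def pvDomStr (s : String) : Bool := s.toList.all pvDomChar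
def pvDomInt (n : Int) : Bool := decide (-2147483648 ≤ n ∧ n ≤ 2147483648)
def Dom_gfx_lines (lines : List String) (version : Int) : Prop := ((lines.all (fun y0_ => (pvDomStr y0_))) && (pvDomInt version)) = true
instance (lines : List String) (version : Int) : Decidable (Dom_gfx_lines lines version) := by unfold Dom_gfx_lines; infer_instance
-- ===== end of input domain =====

-- B re-implements A with a precomputed formatted-palette table, one flat list of
-- formatted color strings and a single index-driven emission pass (no chunked
-- intermediate list of lists); same return value on every input A accepts.

-- ===== PORT A =====
-- module constant system_palette (shared by both Pythons)
def system_palette : List Int :=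
  [0x0000, 0x2511, 0x2527, 0x8530, 0x534A, 0x5455, 0xCC6C, 0xFE7F,
   0x048F, 0xA09F, 0xE2AF, 0xE3B0, 0xAFC2, 0x79D8, 0x7AEF, 0xCAFF,
   0x1102, 0x1311, 0x2324, 0x5531, 0x2247, 0x3354, 0x876A, 0xE77F,
   0x158B, 0x629F, 0xE2AA, 0xB4B0, 0x5BC0, 0x46D7, 0x65EF, 0x98FF]

-- hand port of "0x{0:04X}".format(n): exact for 0 ≤ n < 65536 (every system_palette entry)
def pvHexDigit (n : Nat) : Char := if n < 10 then Char.ofNat (48 + n) else Char.ofNat (55 + n)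
def pvHex4 (n : Int) : List Char :=
  ['0', 'x', pvHexDigit (n.toNat / 4096 % 16), pvHexDigit (n.toNat / 256 % 16),
   pvHexDigit (n.toNat / 16 % 16), pvHexDigit (n.toNat % 16)]

-- int(larray[i:i+1], 16) raises ValueError on non-hex: excluded by Pre_, totalised with .getD 0;
-- system_palette[...] likewise totalised with pyGetD (in range under Pre_).
def gfx_lines (lines : List String) (version : Int) : String :=
  let arrayofbytes : List Int := lines.foldl (fun acc gfxline =>
    if PySem.Str.len gfxline == 129 then
      let larray := PySem.Chars.rstrip gfxline.toList
      (PySem.List.pyRange 0 128 1).foldl (fun acc2 i =>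
        acc2 ++ [PySem.List.pyGetD system_palette
          ((PySem.Int.ofCharsBase? (PySem.List.slice larray (some i) (some (i + 1))) 16).getD 0) 0]) acc
    else acc) []
  let chunked : List (List Int) :=
    (PySem.List.pyRange 0 (PySem.List.len arrayofbytes) 12).map
      (fun i => PySem.List.slice arrayofbytes (some i) (some (i + 12)))
  let formattedlines : List (List Char) :=
    (PySem.List.pyRange 0 (PySem.List.len chunked) 1).foldl (fun acc i =>
      let substring := PySem.Chars.join [',', ' '] ((PySem.List.pyGetD chunked i []).map pvHex4)
      let substring := if i < PySem.List.len chunked - 1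
        then '\t' :: (substring ++ [',', '\n'])
        else '\t' :: substring
      acc ++ [substring]) []
  String.mk ("\nstatic color_t spritedata[16384] =\n{\n".toList
    ++ PySem.Chars.join [] formattedlines ++ "\n};".toList)

-- ===== PORT B =====
def gfx_lines_alt (lines : List String) (version : Int) : String :=
  let fmt : List (List Char) := system_palette.map pvHex4
  let vals : List (List Char) := lines.flatMap (fun line =>
    if PySem.Str.len line == 129 then
      (PySem.List.slice (PySem.Chars.rstrip line.toList) none (some 128)).map
        (fun c => PySem.List.pyGetD fmt ((PySem.Int.ofCharsBase? [c] 16).getD 0) [])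
    else [])
  let parts : List (List Char) := (PySem.List.enumerate vals).map (fun p =>
    (if p.1 == 0 then ['\t']
     else if PySem.Int.mod p.1 12 == 0 then [',', '\n', '\t']
     else [',', ' ']) ++ p.2)
  String.mk ("\nstatic color_t spritedata[16384] =\n{\n".toList
    ++ PySem.Chars.join [] parts ++ "\n};".toList)

-- ===== PRECONDITION & SPEC =====
def pvIsHex (c : Char) : Bool :=
  ['0','1','2','3','4','5','6','7','8','9','a','b','c','d','e','f',
   'A','B','C','D','E','F'].contains c

-- Pre_ excludes exactly the inputs where A raises: a line of length 129 whose rstrip is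
-- shorter than 128 (int('',16) → ValueError) or with a non-hex char among its first 128.
def Pre_gfx_lines (lines : List String) (version : Int) : Prop :=
  ∀ line ∈ lines, line.toList.length = 129 →
    128 ≤ (PySem.Chars.rstrip line.toList).length ∧
    ((PySem.Chars.rstrip line.toList).take 128).all pvIsHex = true
instance (lines : List String) (version : Int) : Decidable (Pre_gfx_lines lines version) := by
  unfold Pre_gfx_lines; infer_instance

def pvWitness_gfx_lines : List String × Int := (["00ff"], 0)

def Spec_gfx_lines (lines : List String) (version : Int) (out : String) : Prop := out = gfx_lines_alt lines version
instance (lines : List String) (version : Int) (out : String) : Decidable (Spec_gfx_lines lines version out) := by unfold Spec_gfx_lines; infer_instance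

-- ===== CLAIM (what is proved, stated in full; the proofs are below) =====
def Claim_equal_gfx_lines : Prop := ∀ (lines : List String) (version : Int), Dom_gfx_lines lines version → Pre_gfx_lines lines version → Spec_gfx_lines lines version (gfx_lines lines version)

-- ===== LEMMAS AND PROOFS =====

-- str.join with an empty separator is concatenation
theorem pvJoin0 (ll : List (List Char)) : PySem.Chars.join [] ll = ll.flatten := by
  induction ll with
  | nil => simp [PySem.Chars.join_nil]
  | cons x t ih =>
    cases t with
    | nil => simp [PySem.Chars.join_singleton]
    | cons y r => simp [PySem.Chars.join_cons_cons, ih]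

-- ", ".join(x :: t) unrolled to a flatMap of prefixed elements
theorem pvJoinComma (x : List Char) (t : List (List Char)) :
    PySem.Chars.join [',', ' '] (x :: t) = x ++ t.flatMap (fun c => [',', ' '] ++ c) := by
  induction t generalizing x with
  | nil => simp [PySem.Chars.join_singleton]
  | cons y r ih => simp [PySem.Chars.join_cons_cons, ih y]

-- the chunk list [xs[i:i+12] for i in range(0, len(xs), 12)], recursively
def pvChunks {α : Type} (xs : List α) : List (List α) :=
  match xs with
  | [] => []
  | x :: rest => (x :: rest).take 12 :: pvChunks (rest.drop 11)
termination_by xs.length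
decreasing_by simp only [List.length_drop, List.length_cons]; omega

-- canonical emission of the formatted chunk list
def pvEmit : List (List (List Char)) → List Char
  | [] => []
  | [d] => '\t' :: PySem.Chars.join [',', ' '] d
  | d :: d' :: rest =>
      ('\t' :: (PySem.Chars.join [',', ' '] d ++ [',', '\n'])) ++ pvEmit (d' :: rest)

theorem pvChunks_map {α β : Type} (f : α → β) (xs : List α) :
    pvChunks (xs.map f) = (pvChunks xs).map (List.map f) := by
  induction xs using pvChunks.induct with
  | case1 => simp [pvChunks]
  | case2 x rest ih =>
    simp only [List.map_cons]
    rw [pvChunks, pvChunks]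
    simp [← List.map_drop, ih, List.map_take]

theorem pvSliceShift {α : Type} (xs : List α) (k : Nat) :
    PySem.List.slice xs (some (0 + 12 * ((k + 1 : Nat) : Int)))
        (some (0 + 12 * ((k + 1 : Nat) : Int) + 12))
      = PySem.List.slice (xs.drop 12) (some (0 + 12 * (k : Int))) (some (0 + 12 * (k : Int) + 12)) := by
  have e1 : (0 + 12 * ((k + 1 : Nat) : Int)) = ((12 * k + 12 : Nat) : Int) := by push_cast; ring
  have e2 : (0 + 12 * ((k + 1 : Nat) : Int) + 12) = ((12 * k + 24 : Nat) : Int) := by push_cast; ring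
  have e3 : (0 + 12 * (k : Int)) = ((12 * k : Nat) : Int) := by push_cast; ring
  have e4 : (0 + 12 * (k : Int) + 12) = ((12 * k + 12 : Nat) : Int) := by push_cast; ring
  rw [e2, e1, e4, e3, PySem.List.slice_natCast, PySem.List.slice_natCast, List.drop_drop]
  have hc : 12 + 12 * k = 12 * k + 12 := by omega
  rw [hc]
  congr 1
  omega

theorem pvChunkShape {α : Type} (xs : List α) :
    (PySem.List.pyRange 0 (PySem.List.len xs) 12).map
      (fun i => PySem.List.slice xs (some i) (some (i + 12))) = pvChunks xs := by
  induction xs using pvChunks.induct with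
  | case1 =>
    rw [PySem.List.pyRange_of_pos _ _ (by norm_num : (0:Int) < 12)]
    simp [pvChunks, PySem.List.len_eq]
  | case2 x rest ih =>
    rw [PySem.List.pyRange_of_pos _ _ (by norm_num : (0:Int) < 12)] at ih ⊢
    simp only [PySem.List.len_eq] at ih ⊢
    have hlen : ((x :: rest).length : Int) = (rest.length : Int) + 1 := by simp
    have hpos : (0:Int) < ((x :: rest).length : Int) := by simp
    rw [if_pos hpos] at ⊢
    have hm : (((((x :: rest).length : Int)) - 0 + 12 - 1) / 12).toNat
        = (if (0:Int) < ((rest.drop 11).length : Int)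
            then ((((rest.drop 11).length : Int) - 0 + 12 - 1) / 12).toNat else 0) + 1 := by
      have h1 : ((rest.drop 11).length : Int) = ((rest.length : Int) - 11) ⊔ 0 := by
        simp [List.length_drop]; omega
      split <;> omega
    rw [hm, List.range_succ_eq_map]
    simp only [List.map_cons, List.map_map]
    rw [pvChunks]
    congr 1
    · -- head chunk: xs[0:12] = take 12
      have e0' : (0 + 12 * ((0:Nat) : Int) + 12) = ((12:Nat) : Int) := by norm_num
      have e0 : (0 + 12 * ((0:Nat) : Int)) = ((0:Nat) : Int) := by norm_num
      show PySem.List.slice (x :: rest) (some (0 + 12 * ((0:Nat) : Int)))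
          (some (0 + 12 * ((0:Nat) : Int) + 12)) = _
      rw [e0', e0, PySem.List.slice_natCast]
      simp
    · -- tail chunks
      rw [← ih]
      simp only [List.map_map]
      apply List.map_congr_left
      intro k _
      show PySem.List.slice (x :: rest) (some (0 + 12 * ((k + 1 : Nat) : Int)))
          (some (0 + 12 * ((k + 1 : Nat) : Int) + 12)) = _
      rw [pvSliceShift]
      have hd : (x :: rest).drop 12 = rest.drop 11 := by rw [List.drop_succ_cons]
      rw [hd]
      rfl

theorem pvEnumerate_map {α β : Type} (f : α → β) (xs : List α) (s : Int) :
    PySem.List.enumerate (xs.map f) s = (PySem.List.enumerate xs s).map (fun p => (p.1, f p.2)) := by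
  induction xs generalizing s with
  | nil => simp [PySem.List.enumerate]
  | cons x t ih => simp [PySem.List.enumerate_cons, ih]

-- A's emission loop over the chunk list equals the canonical emission
theorem pvEA (ds : List (List (List Char))) (s n : Int) (h : s + ds.length = n) :
    ((PySem.List.enumerate ds s).map (fun p =>
      if p.1 < n - 1 then '\t' :: (PySem.Chars.join [',', ' '] p.2 ++ [',', '\n'])
      else '\t' :: PySem.Chars.join [',', ' '] p.2)).flatten = pvEmit ds := by
  induction ds generalizing s with
  | nil => simp [PySem.List.enumerate, pvEmit]
  | cons d t ih =>
    rw [PySem.List.enumerate_cons]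
    cases t with
    | nil =>
      have hc : ¬ (s < n - 1) := by simp at h; omega
      simp [pvEmit, hc, PySem.List.enumerate]
    | cons d' r =>
      have hc : s < n - 1 := by simp at h; push_cast at h; omega
      have ht : (s + 1) + ((d' :: r).length : Int) = n := by simp at h ⊢; push_cast at h ⊢; omega
      rw [pvEmit]
      simp only [List.map_cons, List.flatten_cons, if_pos hc, ih (s + 1) ht]
      try simp

def pvPref (p : Int × List Char) : List Char :=
  (if p.1 == 0 then ['\t']
   else if PySem.Int.mod p.1 12 == 0 then [',', '\n', '\t']
   else [',', ' ']) ++ p.2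

-- B's prefix is 12-periodic away from index 0
theorem pvShift12 (t : List (List Char)) (k : Int) (hk : 1 ≤ k) :
    (PySem.List.enumerate t (k + 12)).map pvPref = (PySem.List.enumerate t k).map pvPref := by
  induction t generalizing k with
  | nil => simp [PySem.List.enumerate]
  | cons x r ih =>
    rw [PySem.List.enumerate_cons, PySem.List.enumerate_cons]
    have h1 : (k + 12 == (0:Int)) = false := by simp; omega
    have h2 : (k == (0:Int)) = false := by simp; omega
    have hmod : PySem.Int.mod (k + 12) 12 = PySem.Int.mod k 12 := by
      rw [PySem.Int.mod_eq_emod_of_pos (by norm_num), PySem.Int.mod_eq_emod_of_pos (by norm_num)]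
      omega
    have hk1 : k + 12 + 1 = (k + 1) + 12 := by ring
    simp only [List.map_cons, pvPref, h1, h2, hmod, hk1, ih (k + 1) (by omega)]

-- inside a row (indices 1..11) every element is prefixed by ", "
theorem pvInner (t : List (List Char)) (s : Int) (h1 : 1 ≤ s) (h2 : s + t.length ≤ 12) :
    ((PySem.List.enumerate t s).map pvPref).flatten = t.flatMap (fun c => [',', ' '] ++ c) := by
  induction t generalizing s with
  | nil => simp [PySem.List.enumerate]
  | cons x r ih =>
    rw [PySem.List.enumerate_cons]
    have h0 : (s == (0:Int)) = false := by simp; omega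
    have hmod : (PySem.Int.mod s 12 == 0) = false := by
      rw [PySem.Int.mod_eq_emod_of_pos (by norm_num)]
      simp at h2 ⊢
      omega
    have hr : (s + 1) + (r.length : Int) ≤ 12 := by simp at h2; push_cast at h2 ⊢; omega
    simp only [List.map_cons, List.flatten_cons, pvPref, h0, hmod, ih (s + 1) (by omega) hr]
    simp

-- B's index-driven emission equals the canonical chunked emission
theorem pvM (ws : List (List Char)) :
    ((PySem.List.enumerate ws).map pvPref).flatten = pvEmit (pvChunks ws) := by
  induction ws using pvChunks.induct with
  | case1 => simp [PySem.List.enumerate, pvChunks, pvEmit]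
  | case2 x rest ih =>
    rw [pvChunks]
    have hx : pvPref (0, x) = '\t' :: x := by simp [pvPref]
    rcases Nat.lt_or_ge rest.length 12 with hlt | hge
    · -- the whole list is one (final) chunk
      have hdrop : rest.drop 11 = [] := by
        cases Nat.lt_or_ge rest.length 11 with
        | inl h => simp [List.drop_eq_nil_of_le, Nat.le_of_lt h]
        | inr h => have : rest.length = 11 ∨ rest.length < 11 := by omega
                   rcases this with h' | h'
                   · simp [List.drop_eq_nil_of_le, h'.le]
                   · simp [List.drop_eq_nil_of_le, h'.le]
      have htake : (x :: rest).take 12 = x :: rest := by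
        apply List.take_of_length_le; simp; omega
      rw [hdrop, htake, pvChunks]
      show ((PySem.List.enumerate (x :: rest) 0).map pvPref).flatten = pvEmit [x :: rest]
      rw [PySem.List.enumerate_cons]
      simp only [List.map_cons, List.flatten_cons, hx, zero_add]
      rw [pvInner rest 1 le_rfl (by push_cast; omega)]
      rw [pvEmit, pvJoinComma]
      simp
    · -- at least two chunks
      obtain ⟨d, t, hdt⟩ : ∃ d t, rest.drop 11 = d :: t := by
        cases h : rest.drop 11 with
        | nil =>
          exfalso
          have := congrArg List.length h
          simp at this
          omega
        | cons d t => exact ⟨d, t, rfl⟩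
      have hsplit : rest = rest.take 11 ++ d :: t := by rw [← hdt, List.take_append_drop]
      have hlen11 : (rest.take 11).length = 11 := by simp; omega
      have htake : (x :: rest).take 12 = x :: rest.take 11 := rfl
      rw [hdt] at ih ⊢
      -- left side
      rw [PySem.List.enumerate_cons]
      conv_lhs => rw [hsplit]
      rw [PySem.List.enumerate_append]
      have h12 : (1 : Int) + ((rest.take 11).length : Int) = 12 := by rw [hlen11]; norm_num
      simp only [zero_add]
      rw [h12, PySem.List.enumerate_cons]
      have hd12 : pvPref (12, d) = [',', '\n', '\t'] ++ d := by simp [pvPref]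
      have h13 : (12 : Int) + 1 = 1 + 12 := by norm_num
      rw [h13]
      simp only [List.map_cons, List.map_append, List.flatten_cons, List.flatten_append, hx, hd12]
      rw [pvShift12 t 1 le_rfl]
      rw [pvInner (rest.take 11) 1 le_rfl (by rw [hlen11]; norm_num)]
      -- right side: expose the cons-cons shape of the chunk list
      rw [htake, pvChunks, pvEmit, ← pvChunks]
      rw [← ih, PySem.List.enumerate_cons]
      simp only [List.map_cons, List.flatten_cons]
      rw [pvJoinComma]
      simp [pvPref]

theorem pvHexRange (c : Char) (h : pvIsHex c = true) :
    0 ≤ (PySem.Int.ofCharsBase? [c] 16).getD 0 ∧ (PySem.Int.ofCharsBase? [c] 16).getD 0 < 16 := by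
  have hm : c ∈ ['0','1','2','3','4','5','6','7','8','9','a','b','c','d','e','f',
      'A','B','C','D','E','F'] := by
    simpa [pvIsHex] using h
  fin_cases hm <;> decide

-- A's per-line loop over 128 singleton slices, as a map over the first 128 chars
theorem pvLineA (larray : List Char) (h : 128 ≤ larray.length) :
    (PySem.List.pyRange 0 128 1).map (fun i =>
        PySem.List.pyGetD system_palette
          ((PySem.Int.ofCharsBase? (PySem.List.slice larray (some i) (some (i + 1))) 16).getD 0) 0)
      = (larray.take 128).map (fun c =>
          PySem.List.pyGetD system_palette ((PySem.Int.ofCharsBase? [c] 16).getD 0) 0) := by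
  rw [PySem.List.pyRange_one]
  have h0 : ((128:Int) - 0).toNat = 128 := by decide
  rw [h0, List.map_map]
  apply List.ext_getElem
  · simp; omega
  · intro i h1 h2
    have hi : i < 128 := by simpa using h1
    simp only [List.getElem_map, List.getElem_range, Function.comp, List.getElem_take]
    have e2 : ((0:Int) + (i:Int) + 1) = (((i+1):Nat):Int) := by push_cast; ring
    have e1 : ((0:Int) + (i:Int)) = ((i:Nat):Int) := by norm_num
    rw [e2, e1, PySem.List.slice_natCast]
    have ht : (larray.drop i).take (i + 1 - i) = [larray[i]] := by
      have : i + 1 - i = 1 := by omega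
      rw [this]
      exact List.take_one_drop_eq_of_lt_length (by omega)
    rw [ht]

-- B's per-line values are A's per-line bytes formatted
theorem pvLineB (larray : List Char)
    (hhex : ∀ c ∈ larray.take 128, pvIsHex c = true) :
    (PySem.List.slice larray none (some 128)).map (fun c =>
        PySem.List.pyGetD (system_palette.map pvHex4) ((PySem.Int.ofCharsBase? [c] 16).getD 0) [])
      = (larray.take 128).map (fun c =>
          pvHex4 (PySem.List.pyGetD system_palette ((PySem.Int.ofCharsBase? [c] 16).getD 0) 0)) := by
  have hsl : PySem.List.slice larray none (some (128:Int)) = larray.take 128 := by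
    rw [show ((128:Int)) = ((128:Nat):Int) by norm_num, PySem.List.slice_to_natCast]
  rw [hsl]
  apply List.map_congr_left
  intro c hc
  obtain ⟨hj0, hj16⟩ := pvHexRange c (hhex c hc)
  have hlen32 : system_palette.length = 32 := rfl
  have hlt1 : (PySem.Int.ofCharsBase? [c] 16).getD 0 < (((system_palette.map pvHex4).length : Nat) : Int) := by
    simp [hlen32]; omega
  have hlt2 : (PySem.Int.ofCharsBase? [c] 16).getD 0 < ((system_palette.length : Nat) : Int) := by
    rw [hlen32]; omega
  rw [PySem.List.pyGetD_eq_getElem _ _ hj0 hlt1, PySem.List.pyGetD_eq_getElem _ _ hj0 hlt2,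
      List.getElem_map]

-- per-line bytes A appends for one .p8 line
def pvLineBytes (line : String) : List Int :=
  if PySem.Str.len line == 129 then
    ((PySem.Chars.rstrip line.toList).take 128).map
      (fun c => PySem.List.pyGetD system_palette ((PySem.Int.ofCharsBase? [c] 16).getD 0) 0)
  else []

theorem pvFlatMapCongr {α β : Type} {l : List α} {f g : α → List β}
    (h : ∀ x ∈ l, f x = g x) : l.flatMap f = l.flatMap g := by
  induction l with
  | nil => rfl
  | cons x t ih =>
    simp only [List.flatMap_cons, h x (List.mem_cons_self), ih (fun y hy => h y (List.mem_cons_of_mem x hy))]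

theorem pvLen129 (line : String) :
    (PySem.Str.len line == 129) = true ↔ line.toList.length = 129 := by
  simp [PySem.Str.len_eq]
  omega

-- A's value, normalised to the canonical emission of the flat byte list
theorem pvASide (lines : List String) (version : Int) (hpre : Pre_gfx_lines lines version) :
    gfx_lines lines version
      = String.mk ("\nstatic color_t spritedata[16384] =\n{\n".toList
          ++ pvEmit (pvChunks ((lines.flatMap pvLineBytes).map pvHex4)) ++ "\n};".toList) := by
  unfold gfx_lines
  simp only []
  have hbytes : lines.foldl (fun acc gfxline =>
      if (PySem.Str.len gfxline == 129) = true then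
        (PySem.List.pyRange 0 128 1).foldl (fun acc2 i =>
          acc2 ++ [PySem.List.pyGetD system_palette
            ((PySem.Int.ofCharsBase? (PySem.List.slice (PySem.Chars.rstrip gfxline.toList) (some i) (some (i + 1))) 16).getD 0) 0]) acc
      else acc) [] = lines.flatMap pvLineBytes := by
    have hb : (fun (acc : List Int) gfxline =>
        if (PySem.Str.len gfxline == 129) = true then
          (PySem.List.pyRange 0 128 1).foldl (fun acc2 i =>
            acc2 ++ [PySem.List.pyGetD system_palette
              ((PySem.Int.ofCharsBase? (PySem.List.slice (PySem.Chars.rstrip gfxline.toList) (some i) (some (i + 1))) 16).getD 0) 0]) acc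
        else acc)
        = (fun acc gfxline => acc ++ (if (PySem.Str.len gfxline == 129) = true then
            (PySem.List.pyRange 0 128 1).map (fun i =>
              PySem.List.pyGetD system_palette
                ((PySem.Int.ofCharsBase? (PySem.List.slice (PySem.Chars.rstrip gfxline.toList) (some i) (some (i + 1))) 16).getD 0) 0)
          else [])) := by
      funext acc gfxline
      split
      · rw [PySem.List.foldl_append_singleton_eq_map]
      · simp
    rw [hb, PySem.List.foldl_append_eq_flatMap, List.nil_append]
    apply pvFlatMapCongr
    intro line hline
    unfold pvLineBytes
    split
    case isTrue hlen =>
      have h129 := (pvLen129 line).mp hlen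
      obtain ⟨hlong, _⟩ := hpre line hline h129
      exact pvLineA (PySem.Chars.rstrip line.toList) hlong
    case isFalse => rfl
  rw [hbytes]
  set bs := lines.flatMap pvLineBytes with hbs
  rw [pvChunkShape bs]
  rw [PySem.List.foldl_append_singleton_eq_map, List.nil_append, pvJoin0]
  have hstep : (PySem.List.pyRange 0 (PySem.List.len (pvChunks bs)) 1).map (fun i =>
      if i < PySem.List.len (pvChunks bs) - 1 then
        '\t' :: (PySem.Chars.join [',', ' '] ((PySem.List.pyGetD (pvChunks bs) i []).map pvHex4) ++ [',', '\n'])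
      else '\t' :: PySem.Chars.join [',', ' '] ((PySem.List.pyGetD (pvChunks bs) i []).map pvHex4))
      = (PySem.List.enumerate (pvChunks bs)).map (fun p =>
      if p.1 < PySem.List.len (pvChunks bs) - 1 then
        '\t' :: (PySem.Chars.join [',', ' '] (p.2.map pvHex4) ++ [',', '\n'])
      else '\t' :: PySem.Chars.join [',', ' '] (p.2.map pvHex4)) := by
    rw [PySem.List.enumerate_eq_map_pyRange (pvChunks bs) [], List.map_map]
    rfl
  rw [hstep]
  have hmapin : (PySem.List.enumerate (pvChunks bs)).map (fun p =>
      if p.1 < PySem.List.len (pvChunks bs) - 1 then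
        '\t' :: (PySem.Chars.join [',', ' '] (p.2.map pvHex4) ++ [',', '\n'])
      else '\t' :: PySem.Chars.join [',', ' '] (p.2.map pvHex4))
      = (PySem.List.enumerate ((pvChunks bs).map (List.map pvHex4))).map (fun p =>
      if p.1 < PySem.List.len (pvChunks bs) - 1 then
        '\t' :: (PySem.Chars.join [',', ' '] p.2 ++ [',', '\n'])
      else '\t' :: PySem.Chars.join [',', ' '] p.2) := by
    rw [pvEnumerate_map, List.map_map]
    rfl
  rw [hmapin, pvEA ((pvChunks bs).map (List.map pvHex4)) 0 (PySem.List.len (pvChunks bs))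
        (by simp [PySem.List.len_eq]),
      ← pvChunks_map]

-- B's value, normalised to the same canonical emission
theorem pvBSide (lines : List String) (version : Int) (hpre : Pre_gfx_lines lines version) :
    gfx_lines_alt lines version
      = String.mk ("\nstatic color_t spritedata[16384] =\n{\n".toList
          ++ pvEmit (pvChunks ((lines.flatMap pvLineBytes).map pvHex4)) ++ "\n};".toList) := by
  unfold gfx_lines_alt
  simp only []
  have hvals : lines.flatMap (fun line =>
      if (PySem.Str.len line == 129) = true then
        (PySem.List.slice (PySem.Chars.rstrip line.toList) none (some 128)).map
          (fun c => PySem.List.pyGetD (system_palette.map pvHex4) ((PySem.Int.ofCharsBase? [c] 16).getD 0) [])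
      else [])
      = (lines.flatMap pvLineBytes).map pvHex4 := by
    rw [List.map_flatMap]
    apply pvFlatMapCongr
    intro line hline
    unfold pvLineBytes
    split
    case isTrue hlen =>
      have h129 := (pvLen129 line).mp hlen
      obtain ⟨_, hhex⟩ := hpre line hline h129
      rw [pvLineB (PySem.Chars.rstrip line.toList) (by simpa [List.all_eq_true] using hhex), List.map_map]
      rfl
    case isFalse => rfl
  rw [hvals]
  have hpref : (fun (p : Int × List Char) =>
      (if p.1 == 0 then ['\t']
       else if PySem.Int.mod p.1 12 == 0 then [',', '\n', '\t']
       else [',', ' ']) ++ p.2) = pvPref := rfl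
  rw [hpref, pvJoin0, pvM]

-- ===== VERDICT (by name: the statement is the Claim_ definition above) =====
theorem gfx_lines_spec : Claim_equal_gfx_lines := by
  intro lines version hdom hpre
  unfold Spec_gfx_lines
  rw [pvASide lines version hpre, pvBSide lines version hpre]
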